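-- pv_equiv track=rewrite | github.com/jared-neumann/PhonoLex | Phonological Search Engine (PSE)/main.py | get_arpasymbol
-- ===== SOURCE A (Python) =====
-- def get_arpasymbol(feature_set, arpa_features, allow_diphthongs):
--
--     matches = set()
--
--     for i in feature_set:
--         for k,v in arpa_features.items():
--             if allow_diphthongs == False:
--                 if i in v and 'diphthong' not in v:
--                     matches.add(k)
--             else:
--                 if i in v:
--                     matches.add(k)
--
--     return matches
-- ===== SOURCE B (Python) =====
-- def get_arpasymbol(feature_set, arpa_features, allow_diphthongs):
--     # Build an inverted index feature -> [arpa keys] once (filtered by the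
--     # diphthong rule), then answer each query feature by one lookup.
--     index = {}
--     for k, v in arpa_features.items():
--         if allow_diphthongs or 'diphthong' not in v:
--             for f in set(v):
--                 index.setdefault(f, []).append(k)
--     matches = set()
--     for i in feature_set:
--         for k in index.get(i, []):
--             matches.add(k)
--     return matches
-- ===== Notes on version B (the rewrite author's own statement) =====
-- stated objective: faster
-- what changed: B builds an inverted index feature->keys over the dict once and answers each query feature by a single lookup, instead of A's rescan of every dict entry for every query feature.
import Mathlib
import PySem

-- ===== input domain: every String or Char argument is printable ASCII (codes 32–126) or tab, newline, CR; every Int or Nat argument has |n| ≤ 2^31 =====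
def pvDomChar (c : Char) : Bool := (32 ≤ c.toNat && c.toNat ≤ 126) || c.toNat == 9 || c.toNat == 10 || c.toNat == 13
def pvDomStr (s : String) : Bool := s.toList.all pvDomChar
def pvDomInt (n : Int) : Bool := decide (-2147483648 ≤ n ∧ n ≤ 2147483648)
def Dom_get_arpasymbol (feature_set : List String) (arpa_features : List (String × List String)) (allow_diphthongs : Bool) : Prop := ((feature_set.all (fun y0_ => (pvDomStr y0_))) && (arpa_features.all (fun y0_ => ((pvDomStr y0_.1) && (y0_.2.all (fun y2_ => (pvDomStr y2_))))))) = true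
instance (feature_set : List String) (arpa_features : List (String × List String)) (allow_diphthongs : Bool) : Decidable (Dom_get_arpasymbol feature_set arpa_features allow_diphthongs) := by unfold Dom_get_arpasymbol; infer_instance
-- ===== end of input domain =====

-- B replaces A's scan of the whole dict per query feature by an inverted index
-- feature -> keys built once; exact same returned set.

-- ===== PORT A =====
-- for i in feature_set: for k, v in arpa_features.items(): … ms.add(k)
def get_arpasymbol (feature_set : List String) (arpa_features : List (String × List String)) (allow_diphthongs : Bool) : List String :=
  let items := (PySem.Dict.ofList arpa_features).items
  feature_set.foldl (fun ms i =>
    items.foldl (fun ms kv =>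
      if allow_diphthongs = false then
        if kv.2.contains i && !(kv.2.contains "diphthong") then PySem.Set.add ms kv.1 else ms
      else
        if kv.2.contains i then PySem.Set.add ms kv.1 else ms) ms)
    PySem.Set.empty

-- ===== PORT B =====
-- index.setdefault(f, []).append(k), over f in set(v)
def pvIndexAdd (d : PySem.Dict String (List String)) (k : String) (v : List String) : PySem.Dict String (List String) :=
  (PySem.Set.ofList v).foldl (fun d f => d.modify f [] (· ++ [k])) d

-- the inverted index: feature -> keys whose feature list contains it (diphthong-filtered)
def pvIndex (items : List (String × List String)) (allow_diphthongs : Bool) : PySem.Dict String (List String) :=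
  items.foldl (fun d kv =>
    if allow_diphthongs || !(kv.2.contains "diphthong") then pvIndexAdd d kv.1 kv.2 else d)
    PySem.Dict.empty

def get_arpasymbol_alt (feature_set : List String) (arpa_features : List (String × List String)) (allow_diphthongs : Bool) : List String :=
  let index := pvIndex (PySem.Dict.ofList arpa_features).items allow_diphthongs
  feature_set.foldl (fun ms i =>
    (index.getD i []).foldl (fun ms k => PySem.Set.add ms k) ms)
    PySem.Set.empty

-- ===== PRECONDITION & SPEC =====
def Spec_get_arpasymbol (feature_set : List String) (arpa_features : List (String × List String)) (allow_diphthongs : Bool) (out : List String) : Prop := out = get_arpasymbol_alt feature_set arpa_features allow_diphthongs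
instance (feature_set : List String) (arpa_features : List (String × List String)) (allow_diphthongs : Bool) (out : List String) : Decidable (Spec_get_arpasymbol feature_set arpa_features allow_diphthongs out) := by unfold Spec_get_arpasymbol; infer_instance

-- ===== CLAIM (what is proved, stated in full; the proofs are below) =====
def Claim_equal_get_arpasymbol : Prop := ∀ (feature_set : List String) (arpa_features : List (String × List String)) (allow_diphthongs : Bool), Dom_get_arpasymbol feature_set arpa_features allow_diphthongs → Spec_get_arpasymbol feature_set arpa_features allow_diphthongs (get_arpasymbol feature_set arpa_features allow_diphthongs)

-- ===== LEMMAS AND PROOFS =====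

-- one kv's contribution to the index, read back at feature i
lemma pv_getD_indexAdd (s : List String) (hs : s.Nodup) (d : PySem.Dict String (List String)) (i k : String) :
    (s.foldl (fun d f => d.modify f [] (· ++ [k])) d).getD i [] =
      d.getD i [] ++ (if i ∈ s then [k] else []) := by
  induction s generalizing d with
  | nil => simp
  | cons f s ih =>
    rcases List.nodup_cons.mp hs with ⟨hf, hs'⟩
    simp only [List.foldl_cons]
    rw [ih hs', PySem.Dict.getD_modify]
    by_cases hif : i = f
    · subst hif; simp [hf]
    · simp [hif]

lemma pv_getD_index (items : List (String × List String)) (allow : Bool)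
    (d : PySem.Dict String (List String)) (i : String) :
    (items.foldl (fun d kv =>
        if allow || !(kv.2.contains "diphthong") then pvIndexAdd d kv.1 kv.2 else d) d).getD i [] =
      d.getD i [] ++
        ((items.filter (fun kv => (allow || !(kv.2.contains "diphthong")) && kv.2.contains i)).map Prod.fst) := by
  induction items generalizing d with
  | nil => simp
  | cons kv items ih =>
    simp only [List.foldl_cons, List.filter_cons]
    by_cases hp : (allow || !(kv.2.contains "diphthong")) = true
    · by_cases hc : kv.2.contains i = true
      · simp only [hp, hc, Bool.and_self, if_pos, ih]
        rw [pvIndexAdd, pv_getD_indexAdd _ (PySem.Set.nodup_ofList kv.2)]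
        have : i ∈ PySem.Set.ofList kv.2 := (PySem.Set.mem_ofList _ _).mpr (by simpa using hc)
        simp [this, List.append_assoc]
      · simp only [hp, Bool.true_and, hc, if_pos, ih]
        rw [pvIndexAdd, pv_getD_indexAdd _ (PySem.Set.nodup_ofList kv.2)]
        have : i ∉ PySem.Set.ofList kv.2 := by
          rw [PySem.Set.mem_ofList]; simpa using hc
        simp [this]
    · simp only [hp, Bool.false_and, ih]
      simp

-- a filtered add-loop is the add-loop over the filtered key list
lemma pv_foldl_add_filter (items : List (String × List String)) (p : String × List String → Bool)
    (m : List String) :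
    items.foldl (fun m kv => if p kv then PySem.Set.add m kv.1 else m) m =
      ((items.filter p).map Prod.fst).foldl (fun m k => PySem.Set.add m k) m := by
  induction items generalizing m with
  | nil => rfl
  | cons kv items ih =>
    simp only [List.foldl_cons, List.filter_cons]
    by_cases hp : p kv = true
    · simp [hp, ih]
    · simp [hp, ih]

-- per query feature: A's scan of all items equals B's index lookup
lemma pv_inner (items : List (String × List String)) (allow : Bool) (ms : List String) (i : String) :
    items.foldl (fun ms kv =>
        if allow = false then
          (if kv.2.contains i && !(kv.2.contains "diphthong") then PySem.Set.add ms kv.1 else ms)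
        else
          (if kv.2.contains i then PySem.Set.add ms kv.1 else ms)) ms =
      ((pvIndex items allow).getD i []).foldl (fun ms k => PySem.Set.add ms k) ms := by
  rw [pvIndex, pv_getD_index, PySem.Dict.getD_empty, List.nil_append]
  cases allow with
  | false =>
    simp only [if_true]
    rw [pv_foldl_add_filter]
    have : (items.filter (fun kv => kv.2.contains i && !(kv.2.contains "diphthong"))) =
        (items.filter (fun kv => (false || !(kv.2.contains "diphthong")) && kv.2.contains i)) := by
      apply List.filter_congr
      intro kv _
      simp [Bool.and_comm]
    rw [this]
  | true =>
    simp only [show (true = false) = False from by simp, if_false]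
    rw [pv_foldl_add_filter]
    have : (items.filter (fun kv => kv.2.contains i)) =
        (items.filter (fun kv => (true || !(kv.2.contains "diphthong")) && kv.2.contains i)) := by
      apply List.filter_congr
      intro kv _
      simp
    rw [this]

-- ===== VERDICT (by name: the statement is the Claim_ definition above) =====
theorem get_arpasymbol_spec : Claim_equal_get_arpasymbol := by
  intro feature_set arpa_features allow_diphthongs _
  unfold Spec_get_arpasymbol get_arpasymbol get_arpasymbol_alt
  have h : (fun (ms : List String) (i : String) =>
      ((PySem.Dict.ofList arpa_features).items).foldl (fun ms kv =>
        if allow_diphthongs = false then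
          (if kv.2.contains i && !(kv.2.contains "diphthong") then PySem.Set.add ms kv.1 else ms)
        else
          (if kv.2.contains i then PySem.Set.add ms kv.1 else ms)) ms) =
      (fun (ms : List String) (i : String) =>
        ((pvIndex (PySem.Dict.ofList arpa_features).items allow_diphthongs).getD i []).foldl
          (fun ms k => PySem.Set.add ms k) ms) := by
    funext ms i
    exact pv_inner _ _ _ _
  simpa using congrArg (fun f => List.foldl f PySem.Set.empty feature_set) h
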